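-- pv_equiv track=rewrite | github.com/rahulsingh3292/hackerrank | angry_professor.py | angryProfessor
-- ===== SOURCE A (Python) =====
-- def angryProfessor(arr,n):
--   arr.sort()
--   student=0
--   for i in range(len(arr)):
--     if arr[i] > 0:
--       break
--     student+=1
--
--   if student >= n:
--     return "NO"
--   return "YES"
-- ===== SOURCE B (Python) =====
-- def angryProfessor(arr, n):
--     arr.sort()
--     lo, hi = 0, len(arr)
--     while lo < hi:
--         mid = (lo + hi) // 2
--         if arr[mid] <= 0:
--             lo = mid + 1
--         else:
--             hi = mid
--     return "NO" if lo >= n else "YES"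
-- ===== Notes on version B (the rewrite author's own statement) =====
-- stated objective: alternative
-- what changed: After the same in-place sort, B counts the on-time students (values <= 0) with a hand-written binary search (bisect_right-style while loop) over the sorted array instead of A's linear scan with break.
import Mathlib
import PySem

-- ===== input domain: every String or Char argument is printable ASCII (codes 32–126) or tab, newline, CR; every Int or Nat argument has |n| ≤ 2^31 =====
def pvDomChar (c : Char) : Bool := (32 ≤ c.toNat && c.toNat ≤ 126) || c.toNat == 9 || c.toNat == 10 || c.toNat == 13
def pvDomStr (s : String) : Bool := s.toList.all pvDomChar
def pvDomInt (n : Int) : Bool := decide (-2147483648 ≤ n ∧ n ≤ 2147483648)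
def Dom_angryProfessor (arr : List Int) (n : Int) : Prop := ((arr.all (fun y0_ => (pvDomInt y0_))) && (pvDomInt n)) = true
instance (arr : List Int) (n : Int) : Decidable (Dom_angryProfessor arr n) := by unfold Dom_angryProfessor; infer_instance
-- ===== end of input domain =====

-- B replaces A's linear scan-with-break over the sorted list by a binary search (bisect_right-style)
-- for the number of values <= 0; same in-place sort side effect, same return value (objective: alternative).


-- ===== PORT A =====
-- the for-loop with break: count leading elements until the first one > 0
def angryScan : List Int → Int
  | [] => 0
  | x :: xs => if x > 0 then 0 else angryScan xs + 1

def angryProfessor (arr : List Int) (n : Int) : String :=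
  let s := PySem.List.sorted arr (fun x => x) false   -- arr.sort()
  let student := angryScan s
  if student ≥ n then "NO" else "YES"

-- ===== PORT B =====
-- the while-loop binary search of Source B; arr[mid] is always in range, getD is exact there
def bisectLoop (s : List Int) (lo hi : Nat) : Nat :=
  if _h : lo < hi then
    let mid := (lo + hi) / 2
    if s.getD mid 0 ≤ 0 then bisectLoop s (mid + 1) hi
    else bisectLoop s lo mid
  else lo
termination_by hi - lo
decreasing_by all_goals omega

def angryProfessor_alt (arr : List Int) (n : Int) : String :=
  let s := PySem.List.sorted arr (fun x => x) false   -- arr.sort()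
  let lo := bisectLoop s 0 s.length
  if (lo : Int) ≥ n then "NO" else "YES"

-- ===== PRECONDITION & SPEC =====
def Spec_angryProfessor (arr : List Int) (n : Int) (out : String) : Prop := out = angryProfessor_alt arr n
instance (arr : List Int) (n : Int) (out : String) : Decidable (Spec_angryProfessor arr n out) := by unfold Spec_angryProfessor; infer_instance

-- ===== CLAIM (what is proved, stated in full; the proofs are below) =====
def Claim_equal_angryProfessor : Prop := ∀ (arr : List Int) (n : Int), Dom_angryProfessor arr n → Spec_angryProfessor arr n (angryProfessor arr n)

-- ===== LEMMAS AND PROOFS =====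

-- A's scan counts the longest <=0 prefix
theorem angryScan_eq_takeWhile (s : List Int) :
    angryScan s = ((s.takeWhile (fun x => decide (x ≤ 0))).length : Int) := by
  induction s with
  | nil => simp [angryScan]
  | cons x xs ih =>
    by_cases h : x > 0
    · simp [angryScan, h, show ¬ (x ≤ 0) by omega]
    · simp [angryScan, h, show x ≤ 0 by omega, ih]

theorem takeWhile_stop (l : List Int) (p : Int → Bool)
    (h : (l.takeWhile p).length < l.length) :
    ¬ p (l[(l.takeWhile p).length]'h) := by
  set T := (l.takeWhile p).length with hT
  have hsplit : l.takeWhile p ++ l.dropWhile p = l := List.takeWhile_append_dropWhile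
  have hd : l.dropWhile p ≠ [] := by
    intro hnil
    have : l.length = T := by
      conv_lhs => rw [← hsplit]
      simp [hnil, hT]
    omega
  have hhead : p ((l.dropWhile p).head hd) = false := List.head_dropWhile_not p hd
  have hlen : T < (l.takeWhile p ++ l.dropWhile p).length := by rw [hsplit]; omega
  have heq : l[T]'h = (l.takeWhile p ++ l.dropWhile p)[T]'hlen := List.getElem_of_eq hsplit.symm h
  rw [heq, List.getElem_append_right (by omega)]
  simp [List.head_eq_getElem, hT] at hhead ⊢
  convert hhead using 2

theorem takeWhile_bound {s : List Int} {i : Nat} (hi : i < s.length)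
    (hs : s.Pairwise (· ≤ ·)) :
    (s.getD i 0 ≤ 0 ↔ i < (s.takeWhile (fun x => decide (x ≤ 0))).length) := by
  set p : Int → Bool := fun x => decide (x ≤ 0) with hp
  set T := (s.takeWhile p).length with hT
  have hTle : T ≤ s.length := (List.takeWhile_sublist _).length_le
  have hmem : ∀ j (hj : j < T), s[j]'(by omega) ≤ 0 := by
    intro j hj
    have h1 : p ((s.takeWhile p)[j]'(by omega)) := List.mem_takeWhile_imp (List.getElem_mem (by omega))
    have h2 : (s.takeWhile p)[j]'(by omega) = s[j]'(by omega) := (List.takeWhile_prefix p).getElem (by omega)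
    rw [h2] at h1
    simpa [hp] using h1
  have hmono : ∀ q r (_hqr : q ≤ r) (hr : r < s.length), s[q]'(by omega) ≤ s[r]'(hr) := by
    intro q r hqr hr
    rcases Nat.lt_or_ge q r with h | h
    · exact (List.pairwise_iff_getElem.mp hs) q r (by omega) hr h
    · have : q = r := by omega
      subst this; rfl
  have hget : s.getD i 0 = s[i]'hi := List.getD_eq_getElem s 0 hi
  rw [hget]
  constructor
  · intro hle
    by_contra hTi
    have hTs : T < s.length := by omega
    have hstop := takeWhile_stop s p hTs
    simp only [hp, decide_eq_true_eq] at hstop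
    exact hstop (le_trans (hmono T i (by omega) hi) hle)
  · intro hiT
    exact hmem i hiT

theorem bisectLoop_eq (s : List Int) (hs : s.Pairwise (· ≤ ·)) :
    ∀ d lo hi, hi - lo = d → lo ≤ (s.takeWhile (fun x => decide (x ≤ 0))).length →
      (s.takeWhile (fun x => decide (x ≤ 0))).length ≤ hi → hi ≤ s.length →
      bisectLoop s lo hi = (s.takeWhile (fun x => decide (x ≤ 0))).length := by
  intro d
  induction d using Nat.strong_induction_on with
  | _ d ih =>
    intro lo hi hd hloT hThi hhis
    set T := (s.takeWhile (fun x => decide (x ≤ 0))).length with hT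
    by_cases h : lo < hi
    · have hmid1 : lo ≤ (lo + hi) / 2 := by omega
      have hmid2 : (lo + hi) / 2 < hi := by omega
      have hb := takeWhile_bound (s := s) (i := (lo + hi) / 2) (by omega) hs
      rw [bisectLoop]
      simp only [h, dif_pos]
      by_cases hle : s.getD ((lo + hi) / 2) 0 ≤ 0
      · have hlt : (lo + hi) / 2 < T := hb.mp hle
        simp only [hle, if_pos]
        exact ih (hi - ((lo + hi) / 2 + 1)) (by omega) ((lo + hi) / 2 + 1) hi rfl (by omega) (by omega) hhis
      · have hge : T ≤ (lo + hi) / 2 := by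
          by_contra hc; exact hle (hb.mpr (by omega))
        simp only [hle, if_neg, not_false_iff]
        exact ih ((lo + hi) / 2 - lo) (by omega) lo ((lo + hi) / 2) rfl hloT hge (by omega)
    · rw [bisectLoop]
      simp only [h, dif_neg, not_false_iff]
      omega

-- ===== VERDICT (by name: the statement is the Claim_ definition above) =====
theorem angryProfessor_spec : Claim_equal_angryProfessor := by
  intro arr n _
  unfold Spec_angryProfessor angryProfessor angryProfessor_alt
  set s := PySem.List.sorted arr (fun x => x) false with hsdef
  have hs : s.Pairwise (· ≤ ·) := by
    simpa using PySem.List.sorted_pairwise (xs := arr) (key := fun x => x)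
  have hb : bisectLoop s 0 s.length = (s.takeWhile (fun x => decide (x ≤ 0))).length :=
    bisectLoop_eq s hs s.length 0 s.length rfl (Nat.zero_le _) (List.takeWhile_sublist _).length_le (Nat.le_refl _)
  simp only [angryScan_eq_takeWhile, hb]
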